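-- pv_equiv track=rewrite | github.com/kangminchan99/coding_test_python | 프로그래머스/코딩 기초 트레이닝/Lv0 -빈 배열에 추가, 삭제하기.py | solution
-- ===== SOURCE A (Python) =====
-- def solution(arr, flag):
--     answer = []
--     result = list(zip(arr, flag))
--     for i in result:
--         if i[1] == True:
--             # answer리스트에 요소 추가
--             answer.extend([i[0]] * (i[0] * 2))
--         else:
--             # 뒤에서 -i[0]번까지 삭제
--             answer = answer[:-i[0]]
--     return answer
-- ===== SOURCE B (Python) =====
-- def _prefix_len(n, stop):
--     """Length of the prefix lst[:stop] of an n-element list (slice endpoint normalization)."""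
--     if stop < 0:
--         stop += n
--     return min(max(stop, 0), n)
--
--
-- def solution(arr, flag):
--     # Run-length segments: an addition pushes one (value, count) pair instead of
--     # appending count elements; a deletion pops/shrinks segments from the end;
--     # the answer is materialized once at the end.
--     segs = []
--     n = 0
--     for x, f in zip(arr, flag):
--         if f:
--             k = max(2 * x, 0)
--             if k:
--                 segs.append((x, k))
--                 n += k
--         else:
--             keep = _prefix_len(n, -x)  # deleting x items keeps the prefix [:-x]
--             while n > keep:
--                 v, k = segs.pop()
--                 if n - k >= keep:
--                     n -= k
--                 else:
--                     segs.append((v, k - (n - keep)))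
--                     n = keep
--     out = []
--     for v, k in segs:
--         out += [v] * k
--     return out
-- ===== Notes on version B (the rewrite author's own statement) =====
-- stated objective: faster
-- what changed: Replaces the per-step element building and full-list slice copy on every deletion by a run-length segment stack (one (value,count) pair per addition, pop/shrink per deletion, with the slice endpoint normalized by a small helper), materializing the answer once at the end.
import Mathlib
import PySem

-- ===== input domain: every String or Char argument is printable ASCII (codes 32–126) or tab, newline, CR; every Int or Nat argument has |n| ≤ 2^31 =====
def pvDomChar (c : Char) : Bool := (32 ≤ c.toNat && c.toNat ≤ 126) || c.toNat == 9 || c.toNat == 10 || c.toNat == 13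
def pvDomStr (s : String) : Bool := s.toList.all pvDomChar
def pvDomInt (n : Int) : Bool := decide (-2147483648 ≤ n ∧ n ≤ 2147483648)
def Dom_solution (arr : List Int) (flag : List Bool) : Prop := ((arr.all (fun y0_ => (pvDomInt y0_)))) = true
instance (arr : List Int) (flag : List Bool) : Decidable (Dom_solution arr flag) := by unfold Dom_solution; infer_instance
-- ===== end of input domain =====

-- B replaces A's per-step element building and slice copies by a run-length segment stack,
-- materialized once at the end (alternative algorithm, asymptotically less copying).

-- ===== PORT A =====
-- literal port of A: fold over zip(arr, flag); True extends by [x]*(x*2), False slices answer[:-x]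
def solution (arr : List Int) (flag : List Bool) : List Int :=
  (arr.zip flag).foldl
    (fun answer i =>
      if i.2 = true then
        answer ++ PySem.List.pyRepeat [i.1] (i.1 * 2)
      else
        PySem.List.slice answer none (some (-i.1)))
    []

-- ===== PORT B =====
-- _prefix_len of Source B: length of the prefix lst[:stop] of an n-element list
def prefixLen (n stop : Int) : Int :=
  let s := if stop < 0 then stop + n else stop
  min (max s 0) n

-- the 'while n > keep' pop/shrink loop of Source B; Lean list head = top of the Python stack
def bTrim (keep : Int) : List (Int × Int) → Int → List (Int × Int) × Int
  | [], n => ([], n)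
  | (v, k) :: rest, n =>
    if n ≤ keep then ((v, k) :: rest, n)
    else if keep ≤ n - k then bTrim keep rest (n - k)
    else ((v, k - (n - keep)) :: rest, keep)

-- one iteration of Source B's main loop over (segs, n)
def bStep (st : List (Int × Int) × Int) (p : Int × Bool) : List (Int × Int) × Int :=
  if p.2 then
    let k := max (2 * p.1) 0
    if k ≠ 0 then ((p.1, k) :: st.1, st.2 + k) else st
  else
    if st.2 ≤ prefixLen st.2 (-p.1) then st
    else bTrim (prefixLen st.2 (-p.1)) st.1 st.2

def solution_alt (arr : List Int) (flag : List Bool) : List Int :=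
  let st := (arr.zip flag).foldl bStep ([], 0)
  -- materialization loop: newest segment is the list head, so each segment is prepended
  st.1.foldl (fun out s => List.replicate s.2.toNat s.1 ++ out) []

-- ===== PRECONDITION & SPEC =====
def Spec_solution (arr : List Int) (flag : List Bool) (out : List Int) : Prop := out = solution_alt arr flag
instance (arr : List Int) (flag : List Bool) (out : List Int) : Decidable (Spec_solution arr flag out) := by unfold Spec_solution; infer_instance

-- ===== CLAIM (what is proved, stated in full; the proofs are below) =====
def Claim_equal_solution : Prop := ∀ (arr : List Int) (flag : List Bool), Dom_solution arr flag → Spec_solution arr flag (solution arr flag)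

-- ===== LEMMAS AND PROOFS =====

-- flattening of the segment stack (newest-first): concatenation of the runs
def bFlat (segs : List (Int × Int)) : List Int :=
  segs.flatMap (fun s => List.replicate s.2.toNat s.1)

lemma bFlat_cons (v k : Int) (rest : List (Int × Int)) :
    bFlat ((v, k) :: rest) = List.replicate k.toNat v ++ bFlat rest := rfl

-- invariant of Source B's loop state relative to A's running answer
def LoopInv (segs : List (Int × Int)) (n : Int) (ans : List Int) : Prop :=
  bFlat segs = ans.reverse ∧ (∀ s ∈ segs, 0 < s.2) ∧ ((segs.map (·.2)).sum = n)

lemma loopInv_length {segs : List (Int × Int)} {n : Int} {ans : List Int} (h : LoopInv segs n ans) :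
    n = (ans.length : Int) := by
  obtain ⟨h1, h2, h3⟩ := h
  have : (bFlat segs).length = ans.length := by rw [h1]; simp
  rw [← this, ← h3]
  clear h1 h3 this
  induction segs with
  | nil => simp [bFlat]
  | cons s rest ih =>
    obtain ⟨v, k⟩ := s
    have hk : 0 < k := h2 (v, k) (by simp)
    rw [bFlat_cons]
    simp only [List.length_append, List.length_replicate, List.map_cons, List.sum_cons]
    rw [ih (fun s hs => h2 s (by simp [hs]))]
    push_cast
    omega

lemma sum_nonneg_of_pos (l : List (Int × Int)) (h : ∀ s ∈ l, 0 < s.2) :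
    0 ≤ (l.map (·.2)).sum := by
  induction l with
  | nil => simp
  | cons t ts ih =>
    have ht := h t (by simp)
    have := ih (fun s hs => h s (by simp [hs]))
    simp only [List.map_cons, List.sum_cons]
    omega

lemma bTrim_spec (keep : Int) (hkeep : 0 ≤ keep) :
    ∀ (segs : List (Int × Int)) (n : Int),
      (∀ s ∈ segs, 0 < s.2) → ((segs.map (·.2)).sum = n) →
      bFlat (bTrim keep segs n).1 = (bFlat segs).drop (n - keep).toNat ∧
        (∀ s ∈ (bTrim keep segs n).1, 0 < s.2) ∧
        (((bTrim keep segs n).1.map (·.2)).sum = (bTrim keep segs n).2) ∧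
        (bTrim keep segs n).2 = min n keep := by
  intro segs
  induction segs with
  | nil =>
    intro n hpos hsum
    simp only [List.map_nil, List.sum_nil] at hsum
    subst hsum
    simp [bTrim, bFlat]
    omega
  | cons s rest ih =>
    intro n hpos hsum
    obtain ⟨v, k⟩ := s
    have hk : 0 < k := hpos (v, k) (by simp)
    have hrestpos : ∀ s ∈ rest, 0 < s.2 := fun s hs => hpos s (by simp [hs])
    have hrestsum : (rest.map (·.2)).sum = n - k := by
      simp only [List.map_cons, List.sum_cons] at hsum; omega
    have hrestnn : 0 ≤ n - k := by
      rw [← hrestsum]; exact sum_nonneg_of_pos rest hrestpos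
    rw [bTrim]
    by_cases h1 : n ≤ keep
    · rw [if_pos h1]
      refine ⟨?_, hpos, hsum, by omega⟩
      have : (n - keep).toNat = 0 := by omega
      rw [this, List.drop_zero]
    · rw [if_neg h1]
      by_cases h2 : keep ≤ n - k
      · rw [if_pos h2]
        obtain ⟨f1, f2, f3, f4⟩ := ih (n - k) hrestpos hrestsum
        refine ⟨?_, f2, f3, by omega⟩
        rw [f1, bFlat_cons, List.drop_append]
        have he : (n - keep).toNat - (List.replicate k.toNat v).length = (n - k - keep).toNat := by
          simp; omega
        have hz : List.drop (n - keep).toNat (List.replicate k.toNat v) = [] := by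
          apply List.drop_eq_nil_of_le
          simp; omega
        rw [he, hz, List.nil_append]
      · rw [if_neg h2]
        refine ⟨?_, ?_, ?_, by omega⟩
        · rw [bFlat_cons, bFlat_cons, List.drop_append, List.drop_replicate]
          have hz : (n - keep).toNat - (List.replicate k.toNat v).length = 0 := by
            simp; omega
          rw [hz, List.drop_zero]
          congr 2
          omega
        · intro s hs
          rcases List.mem_cons.mp hs with h | h
          · subst h; simp; omega
          · exact hrestpos s h
        · simp only [List.map_cons, List.sum_cons]
          omega

-- the A-side loop body
def aStep (answer : List Int) (i : Int × Bool) : List Int :=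
  if i.2 = true then answer ++ PySem.List.pyRepeat [i.1] (i.1 * 2)
  else PySem.List.slice answer none (some (-i.1))

-- A's slice answer[:-x] is the take of the normalized prefix length
lemma slice_eq_take_prefixLen (ans : List Int) (x : Int) :
    PySem.List.slice ans none (some (-x)) = ans.take (prefixLen (ans.length : Int) (-x)).toNat := by
  by_cases hx : 0 < x
  · have hxx : -x = -((x.toNat : Nat) : Int) := by omega
    rw [hxx, PySem.List.slice_to_neg_natCast ans x.toNat (by omega)]
    congr 1
    simp only [prefixLen]
    have hlt : -((x.toNat : Nat) : Int) < 0 := by omega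
    rw [if_pos hlt]
    omega
  · have h0 : (0 : Int) ≤ -x := by omega
    rw [PySem.List.slice_to ans h0]
    simp only [prefixLen]
    rw [if_neg (by omega)]
    by_cases h : -x ≤ (ans.length : Int)
    · congr 1; omega
    · rw [List.take_of_length_le (by omega), List.take_of_length_le (by omega)]

-- reduction lemmas for the two loop bodies
lemma aStep_true (ans : List Int) (x : Int) :
    aStep ans (x, true) = ans ++ PySem.List.pyRepeat [x] (x * 2) := by simp [aStep]

lemma aStep_false (ans : List Int) (x : Int) :
    aStep ans (x, false) = PySem.List.slice ans none (some (-x)) := by simp [aStep]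

lemma bStep_true (segs : List (Int × Int)) (n x : Int) :
    bStep (segs, n) (x, true) =
      if max (2 * x) 0 ≠ 0 then ((x, max (2 * x) 0) :: segs, n + max (2 * x) 0)
      else (segs, n) := by simp [bStep]

lemma bStep_false (segs : List (Int × Int)) (n x : Int) :
    bStep (segs, n) (x, false) =
      if n ≤ prefixLen n (-x) then (segs, n) else bTrim (prefixLen n (-x)) segs n := by
  simp [bStep]

-- one-step preservation: invariant holds for B's state against A's running answer
lemma step_invariant (segs : List (Int × Int)) (n : Int) (ans : List Int) (p : Int × Bool)
    (h : LoopInv segs n ans) : LoopInv (bStep (segs, n) p).1 (bStep (segs, n) p).2 (aStep ans p) := by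
  obtain ⟨x, f⟩ := p
  have hlen := loopInv_length h
  obtain ⟨h1, h2, h3⟩ := h
  cases f with
  | true =>
    rw [bStep_true, aStep_true]
    by_cases hk : max (2 * x) 0 ≠ 0
    · rw [if_pos hk]
      have hx2 : ((x * 2).toNat : Int) = max (2 * x) 0 := by omega
      refine ⟨?_, ?_, ?_⟩
      · rw [bFlat_cons, PySem.List.pyRepeat_singleton, List.reverse_append,
            List.reverse_replicate, h1]
        congr 2
        omega
      · intro s hs
        rcases List.mem_cons.mp hs with hh | hh
        · subst hh; simp; omega
        · exact h2 s hh
      · simp only [List.map_cons, List.sum_cons]; omega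
    · rw [if_neg hk]
      have hrep : PySem.List.pyRepeat [x] (x * 2) = ([] : List Int) := by
        rw [PySem.List.pyRepeat_singleton]
        have : (x * 2).toNat = 0 := by omega
        simp [this]
      rw [hrep, List.append_nil]
      exact ⟨h1, h2, h3⟩
  | false =>
    rw [bStep_false, aStep_false]
    have hkeep : 0 ≤ prefixLen n (-x) ∧ prefixLen n (-x) ≤ n := by
      simp only [prefixLen]
      constructor <;> split_ifs <;> omega
    set keep := prefixLen n (-x) with hkdef
    have hslice : PySem.List.slice ans none (some (-x)) = ans.take keep.toNat := by
      rw [slice_eq_take_prefixLen, hkdef, hlen]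
    by_cases hle : n ≤ keep
    · rw [if_pos hle]
      have : ans.take keep.toNat = ans := by
        apply List.take_of_length_le; omega
      rw [hslice, this]
      exact ⟨h1, h2, h3⟩
    · rw [if_neg hle]
      obtain ⟨f1, f2, f3, f4⟩ := bTrim_spec keep hkeep.1 segs n h2 h3
      refine ⟨?_, f2, f3⟩
      rw [f1, h1, hslice, List.reverse_take]
      congr 1
      omega

lemma loop_invariant (l : List (Int × Bool)) :
    ∀ (segs : List (Int × Int)) (n : Int) (ans : List Int), LoopInv segs n ans →
      LoopInv (l.foldl bStep (segs, n)).1 (l.foldl bStep (segs, n)).2 (l.foldl aStep ans) := by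
  induction l with
  | nil => intro segs n ans h; exact h
  | cons p rest ih =>
    intro segs n ans h
    have hstep := step_invariant segs n ans p h
    simp only [List.foldl_cons]
    have := ih (bStep (segs, n) p).1 (bStep (segs, n) p).2 (aStep ans p) hstep
    simpa using this

lemma materialize_eq_reverse_flat (segs : List (Int × Int)) (acc : List Int) :
    segs.foldl (fun out s => List.replicate s.2.toNat s.1 ++ out) acc = (bFlat segs).reverse ++ acc := by
  induction segs generalizing acc with
  | nil => simp [bFlat]
  | cons s rest ih =>
    obtain ⟨v, k⟩ := s
    rw [List.foldl_cons, ih, bFlat_cons]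
    simp

-- ===== VERDICT (by name: the statement is the Claim_ definition above) =====
theorem solution_spec : Claim_equal_solution := by
  intro arr flag _
  unfold Spec_solution solution solution_alt
  have h := loop_invariant (arr.zip flag) [] 0 [] ⟨rfl, by simp, rfl⟩
  rw [materialize_eq_reverse_flat, List.append_nil, h.1]
  show (List.foldl aStep [] (arr.zip flag)) = (List.foldl aStep [] (arr.zip flag)).reverse.reverse
  rw [List.reverse_reverse]
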